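-- pv_equiv track=rewrite | github.com/DIG-Network/proof_research | sub-problems/verifier-oracle-model/experiments/adaptive-coordinate-or-pair-nand-tree-depth-wt-five-vs-six/script.py | build_nand_partition_masks
-- ===== SOURCE A (Python) =====
-- N = 10
--
-- DOMAIN_SIZE = 462
--
-- def build_nand_partition_masks(masks: list[int]) -> list[tuple[int, int]]:
--     """For each pair (i,j) lex: (both bits 1 => NAND 0, else NAND 1)."""
--     out: list[tuple[int, int]] = []
--     for i in range(N):
--         for j in range(i + 1, N):
--             b_nand0 = 0
--             for k, m in enumerate(masks):
--                 if ((m >> i) & 1) and ((m >> j) & 1):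
--                     b_nand0 |= 1 << k
--             full = (1 << DOMAIN_SIZE) - 1
--             b_nand1 = full ^ b_nand0
--             out.append((b_nand0, b_nand1))
--     return out
-- ===== SOURCE B (Python) =====
-- N = 10
--
-- DOMAIN_SIZE = 462
--
-- def build_nand_partition_masks(masks: list[int]) -> list[tuple[int, int]]:
--     """Single pass over the masks: scatter each mask's bit into the
--     accumulator of every pair of coordinates set in it, then emit pairs
--     in lex order with the complement."""
--     acc: dict[tuple[int, int], int] = {}
--     for k, m in enumerate(masks):
--         bits = [i for i in range(N) if (m >> i) & 1]
--         bit = 1 << k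
--         for bi in bits:
--             for bj in bits:
--                 if bi < bj:
--                     p = (bi, bj)
--                     acc[p] = acc.get(p, 0) | bit
--     full = (1 << DOMAIN_SIZE) - 1
--     return [(acc.get((i, j), 0), full ^ acc.get((i, j), 0))
--             for i in range(N) for j in range(i + 1, N)]
-- ===== Notes on version B (the rewrite author's own statement) =====
-- stated objective: alternative
-- what changed: A rescans the whole mask list for each of the 45 coordinate pairs; B makes a single pass over the masks, scattering each mask's bit 1<<k into a dictionary keyed by every pair of coordinates set in that mask, then emits the pairs in lex order with the complement.
import Mathlib
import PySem

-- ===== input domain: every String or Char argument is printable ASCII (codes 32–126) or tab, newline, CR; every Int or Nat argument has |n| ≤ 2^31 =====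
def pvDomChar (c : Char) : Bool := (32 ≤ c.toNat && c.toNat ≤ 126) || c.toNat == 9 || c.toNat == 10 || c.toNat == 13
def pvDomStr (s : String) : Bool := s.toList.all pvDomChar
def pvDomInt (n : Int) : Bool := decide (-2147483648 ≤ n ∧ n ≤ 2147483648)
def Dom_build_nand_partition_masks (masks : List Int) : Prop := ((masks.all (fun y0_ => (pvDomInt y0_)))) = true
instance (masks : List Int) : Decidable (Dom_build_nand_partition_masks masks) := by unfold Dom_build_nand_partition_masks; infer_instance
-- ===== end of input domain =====

-- B replaces A's per-pair rescan of the whole mask list by a single pass over the masks that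
-- scatters each mask's bit into a dictionary keyed by the pairs of coordinates set in that mask
-- (objective: alternative decomposition, same exact return value).

-- ===== PORT A =====
def build_nand_partition_masks (masks : List Int) : List (Int × Int) :=
  (PySem.List.pyRange 0 10 1).foldl (fun out i =>
    (PySem.List.pyRange (i + 1) 10 1).foldl (fun out j =>
      let b_nand0 : Int :=
        (PySem.List.enumerate masks).foldl (fun b (km : Int × Int) =>
          if (PySem.Int.band (km.2 >>> i.toNat) 1 != 0) && (PySem.Int.band (km.2 >>> j.toNat) 1 != 0) then
            PySem.Int.bor b ((1 : Int) <<< km.1.toNat)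
          else b) 0
      let full : Int := ((1 : Int) <<< 462) - 1
      out ++ [(b_nand0, PySem.Int.bxor full b_nand0)]) out) []

-- ===== PORT B =====
def build_nand_partition_masks_alt (masks : List Int) : List (Int × Int) :=
  let acc : PySem.Dict (Int × Int) Int :=
    (PySem.List.enumerate masks).foldl (fun acc (km : Int × Int) =>
      let bits : List Int :=
        (PySem.List.pyRange 0 10 1).filter (fun i => PySem.Int.band (km.2 >>> i.toNat) 1 != 0)
      let bit : Int := (1 : Int) <<< km.1.toNat
      bits.foldl (fun acc bi =>
        bits.foldl (fun acc bj =>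
          if bi < bj then
            acc.insert (bi, bj) (PySem.Int.bor (acc.getD (bi, bj) 0) bit)
          else acc) acc) acc) PySem.Dict.empty
  let full : Int := ((1 : Int) <<< 462) - 1
  (PySem.List.pyRange 0 10 1).flatMap (fun i =>
    (PySem.List.pyRange (i + 1) 10 1).map (fun j =>
      (acc.getD (i, j) 0, PySem.Int.bxor full (acc.getD (i, j) 0))))

-- ===== PRECONDITION & SPEC =====
def Spec_build_nand_partition_masks (masks : List Int) (out : List (Int × Int)) : Prop := out = build_nand_partition_masks_alt masks
instance (masks : List Int) (out : List (Int × Int)) : Decidable (Spec_build_nand_partition_masks masks out) := by unfold Spec_build_nand_partition_masks; infer_instance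

-- ===== CLAIM (what is proved, stated in full; the proofs are below) =====
def Claim_equal_build_nand_partition_masks : Prop := ∀ (masks : List Int), Dom_build_nand_partition_masks masks → Spec_build_nand_partition_masks masks (build_nand_partition_masks masks)

-- ===== LEMMAS AND PROOFS =====

-- B's inner loop over bj: only keys (bi, ·) change, and key (i, j) is updated exactly when
-- i = bi, bi < j and j ∈ bits (at most once, since bits is Nodup).
theorem pv_innerB (bi bit : Int) (bits : List Int) (hnd : bits.Nodup)
    (d : PySem.Dict (Int × Int) Int) (i j : Int) :
    (bits.foldl (fun acc bj =>
        if bi < bj then acc.insert (bi, bj) (PySem.Int.bor (acc.getD (bi, bj) 0) bit) else acc) d).getD (i, j) 0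
      = if i = bi ∧ bi < j ∧ j ∈ bits then PySem.Int.bor (d.getD (i, j) 0) bit else d.getD (i, j) 0 := by
  induction bits generalizing d with
  | nil => simp
  | cons b rest ih =>
    simp only [List.nodup_cons] at hnd
    rw [List.foldl_cons, ih hnd.2]
    by_cases hlt : bi < b
    · simp only [if_pos hlt]
      by_cases hkey : i = bi ∧ bi < j ∧ j ∈ rest
      · rw [if_pos hkey, if_pos ⟨hkey.1, hkey.2.1, List.mem_cons_of_mem _ hkey.2.2⟩,
          PySem.Dict.getD_insert]
        have hne : ¬ ((i, j) = (bi, b)) := by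
          intro heq
          obtain ⟨h1, h2⟩ := Prod.mk.inj heq
          exact hnd.1 (h2 ▸ hkey.2.2)
        rw [if_neg hne]
      · rw [if_neg hkey, PySem.Dict.getD_insert]
        by_cases heq : (i, j) = (bi, b)
        · obtain ⟨h1, h2⟩ := Prod.mk.inj heq
          subst h1; subst h2
          rw [if_pos rfl, if_pos ⟨rfl, hlt, List.mem_cons_self ..⟩]
        · rw [if_neg heq]
          by_cases hk2 : i = bi ∧ bi < j ∧ j ∈ b :: rest
          · exfalso
            rcases List.mem_cons.mp hk2.2.2 with h | h
            · exact heq (by rw [hk2.1, h])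
            · exact hkey ⟨hk2.1, hk2.2.1, h⟩
          · rw [if_neg hk2]
    · simp only [if_neg hlt]
      by_cases hkey : i = bi ∧ bi < j ∧ j ∈ rest
      · rw [if_pos hkey, if_pos ⟨hkey.1, hkey.2.1, List.mem_cons_of_mem _ hkey.2.2⟩]
      · rw [if_neg hkey]
        by_cases hk2 : i = bi ∧ bi < j ∧ j ∈ b :: rest
        · exfalso
          rcases List.mem_cons.mp hk2.2.2 with h | h
          · exact hlt (h ▸ hk2.2.1)
          · exact hkey ⟨hk2.1, hk2.2.1, h⟩
        · rw [if_neg hk2]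

-- B's double loop: key (i, j) collects bit iff i ∈ l, j ∈ bits and i < j (here l is the outer
-- list, instantiated with bits itself below).
theorem pv_outerB_aux (bit : Int) (bits l : List Int) (hnd : bits.Nodup) (hl : l.Nodup)
    (d : PySem.Dict (Int × Int) Int) (i j : Int) :
    (l.foldl (fun acc bi =>
        bits.foldl (fun acc bj =>
          if bi < bj then acc.insert (bi, bj) (PySem.Int.bor (acc.getD (bi, bj) 0) bit) else acc) acc) d).getD (i, j) 0
      = if i ∈ l ∧ j ∈ bits ∧ i < j then PySem.Int.bor (d.getD (i, j) 0) bit else d.getD (i, j) 0 := by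
  induction l generalizing d with
  | nil => simp
  | cons b rest ih =>
    simp only [List.nodup_cons] at hl
    rw [List.foldl_cons, ih hl.2, pv_innerB b bit bits hnd d i j]
    obtain ⟨hbr, hrest⟩ := hl
    by_cases h2 : i = b
    · subst h2
      by_cases h3 : j ∈ bits <;> by_cases h4 : i < j <;>
        simp_all [List.mem_cons]
    · by_cases h1 : i ∈ rest <;> by_cases h3 : j ∈ bits <;> by_cases h4 : i < j <;>
        simp_all [List.mem_cons]

-- B's single scatter pass over the masks equals A's per-pair accumulator fold, key by key.
theorem pv_main (masks : List Int) (s : Int) (d : PySem.Dict (Int × Int) Int) (i j : Int)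
    (hi : 0 ≤ i) (hij : i < j) (hj : j < 10) :
    ((PySem.List.enumerate masks s).foldl (fun acc (km : Int × Int) =>
        let bits : List Int :=
          (PySem.List.pyRange 0 10 1).filter (fun i => PySem.Int.band (km.2 >>> i.toNat) 1 != 0)
        let bit : Int := (1 : Int) <<< km.1.toNat
        bits.foldl (fun acc bi =>
          bits.foldl (fun acc bj =>
            if bi < bj then acc.insert (bi, bj) (PySem.Int.bor (acc.getD (bi, bj) 0) bit) else acc) acc) acc) d).getD (i, j) 0
      = (PySem.List.enumerate masks s).foldl (fun b (km : Int × Int) =>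
          if (PySem.Int.band (km.2 >>> i.toNat) 1 != 0) && (PySem.Int.band (km.2 >>> j.toNat) 1 != 0) then
            PySem.Int.bor b ((1 : Int) <<< km.1.toNat)
          else b) (d.getD (i, j) 0) := by
  induction masks generalizing s d with
  | nil => simp [PySem.List.enumerate_nil]
  | cons m rest ih =>
    rw [PySem.List.enumerate_cons, List.foldl_cons, List.foldl_cons, ih]
    congr 1
    dsimp only
    rw [pv_outerB_aux _ _ _ ((PySem.List.nodup_pyRange_one 0 10).filter _)
      ((PySem.List.nodup_pyRange_one 0 10).filter _) d i j]
    split_ifs with h1 h2 h3 <;> try rfl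
    · exfalso
      simp only [List.mem_filter, PySem.List.mem_pyRange_one, Bool.and_eq_true] at h1 h2
      exact h2 ⟨h1.1.2, h1.2.1.2⟩
    · exfalso
      simp only [List.mem_filter, PySem.List.mem_pyRange_one, Bool.and_eq_true] at h1 h3
      exact h1 ⟨⟨⟨hi, by omega⟩, h3.1⟩, ⟨⟨by omega, hj⟩, h3.2⟩, hij⟩

-- A's nested append loops build exactly the flatMap/map comprehension B emits.
theorem pv_nested (R : List Int) (S : Int → List Int) (g : Int → Int → (Int × Int))
    (init : List (Int × Int)) :
    R.foldl (fun out i => (S i).foldl (fun out j => out ++ [g i j]) out) init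
      = init ++ R.flatMap (fun i => (S i).map (g i)) := by
  induction R generalizing init with
  | nil => simp
  | cons a r ih =>
    rw [List.foldl_cons, ih, PySem.List.foldl_append_singleton_eq_map, List.flatMap_cons,
      List.append_assoc]

theorem pv_AB (masks : List Int) :
    build_nand_partition_masks masks = build_nand_partition_masks_alt masks := by
  unfold build_nand_partition_masks build_nand_partition_masks_alt
  dsimp only
  rw [pv_nested, List.nil_append]
  apply List.flatMap_congr
  intro i hi
  apply List.map_congr_left
  intro j hj
  rw [PySem.List.mem_pyRange_one] at hi hj
  have h := pv_main masks 0 PySem.Dict.empty i j hi.1 (by omega) (by omega)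
  rw [PySem.Dict.getD_empty] at h
  rw [h]
  simp only [Int.shiftRight_natCast_right]

-- ===== VERDICT (by name: the statement is the Claim_ definition above) =====
theorem build_nand_partition_masks_spec : Claim_equal_build_nand_partition_masks := by
  intro masks _
  unfold Spec_build_nand_partition_masks
  exact pv_AB masks
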